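-- pv_equiv track=rewrite | github.com/RobinElysia/Agent-Contuctor | src/agentconductor/application/benchmark.py | _normalize_multiline_text
-- ===== SOURCE A (Python) =====
-- def _normalize_multiline_text(value: str) -> str:
--     lines = value.replace("\r\n", "\n").replace("\r", "\n").split("\n")
--     normalized_lines = [line.rstrip(" \t") for line in lines]
--     while normalized_lines and normalized_lines[-1] == "":
--         normalized_lines.pop()
--     normalized = "\n".join(normalized_lines).strip()
--     if not normalized:
--         raise ValueError("Benchmark dataset prompt normalization produced an empty prompt.")
--     return normalized
-- ===== SOURCE B (Python) =====
-- def _normalize_multiline_text(value: str) -> str: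
--     # Single left-to-right pass: buffer runs of spaces/tabs and drop them when a
--     # newline (or end of input) follows, instead of split/rstrip/pop/join.
--     out = []
--     pending = []
--     for ch in value.replace("\r\n", "\n").replace("\r", "\n"):
--         if ch == " " or ch == "\t":
--             pending.append(ch)
--         elif ch == "\n":
--             pending = []
--             out.append("\n")
--         else:
--             out.extend(pending)
--             pending = []
--             out.append(ch)
--     normalized = "".join(out).strip()
--     if not normalized:
--         raise ValueError("Benchmark dataset prompt normalization produced an empty prompt.")
--     return normalized
-- ===== Notes on version B (the rewrite author's own statement) =====
-- stated objective: alternative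
-- what changed: Replaces split-on-newline + per-line rstrip + trailing-empty-line pop-loop + join with a single character pass that buffers space/tab runs and discards them before a newline or end of input (the outer strip already makes the pop-loop redundant).
import Mathlib
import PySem

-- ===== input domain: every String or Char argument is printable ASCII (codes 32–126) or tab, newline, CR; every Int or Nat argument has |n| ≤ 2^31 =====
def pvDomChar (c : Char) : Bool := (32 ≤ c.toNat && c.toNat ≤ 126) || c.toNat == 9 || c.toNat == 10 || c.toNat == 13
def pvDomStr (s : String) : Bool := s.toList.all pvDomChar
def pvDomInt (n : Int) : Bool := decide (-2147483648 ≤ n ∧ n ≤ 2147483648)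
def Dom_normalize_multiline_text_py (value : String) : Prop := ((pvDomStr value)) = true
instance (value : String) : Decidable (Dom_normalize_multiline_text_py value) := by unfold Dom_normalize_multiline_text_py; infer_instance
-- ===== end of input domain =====

-- B replaces A's split/per-line-rstrip/pop-loop/join with a single left-to-right pass that
-- buffers space-tab runs and discards them before a newline or end of input; same result.


-- ===== PORT A =====
-- hand port of line.rstrip(" \t"): exact — drops exactly the trailing run of ' '/'\t' characters
def pvRstripST (l : List Char) : List Char :=
  (l.reverse.dropWhile (fun c => c == ' ' || c == '\t')).reverse

-- the 'while normalized_lines and normalized_lines[-1] == "": normalized_lines.pop()' loop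
def pvPopTrailing (ls : List (List Char)) : List (List Char) :=
  if h : ls.getLast? = some ([] : List Char) then pvPopTrailing ls.dropLast else ls
  termination_by ls.length
  decreasing_by
    cases ls with
    | nil => simp at h
    | cons a t => simp [List.length_dropLast]

def normalize_multiline_text_py (value : String) : String :=
  let lines := PySem.Chars.splitOn
      (PySem.Chars.replace (PySem.Chars.replace value.toList ['\r', '\n'] ['\n']) ['\r'] ['\n']) ['\n']
  let normalized_lines := lines.map pvRstripST
  let kept := pvPopTrailing normalized_lines
  String.mk (PySem.Chars.strip (PySem.Chars.join ['\n'] kept))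

-- ===== PORT B =====
def pvStep (acc : List Char × List Char) (c : Char) : List Char × List Char :=
  if c == ' ' || c == '\t' then (acc.1, acc.2 ++ [c])
  else if c == '\n' then (acc.1 ++ ['\n'], [])
  else (acc.1 ++ acc.2 ++ [c], [])

def normalize_multiline_text_py_alt (value : String) : String :=
  let s := PySem.Chars.replace (PySem.Chars.replace value.toList ['\r', '\n'] ['\n']) ['\r'] ['\n']
  String.mk (PySem.Chars.strip (s.foldl pvStep (([] : List Char), ([] : List Char))).1)

-- ===== PRECONDITION & SPEC =====
-- A raises ValueError exactly when the input consists only of spaces/tabs/newlines/CRs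
-- (the normalized prompt is empty); B raises the same ValueError there.
def Pre_normalize_multiline_text_py (value : String) : Prop :=
  value.toList.any (fun c => !(c == ' ' || c == '\t' || c == '\n' || c == '\r')) = true
instance (value : String) : Decidable (Pre_normalize_multiline_text_py value) := by unfold Pre_normalize_multiline_text_py; infer_instance

def pvWitness_normalize_multiline_text_py : String := "a"

def Spec_normalize_multiline_text_py (value : String) (out : String) : Prop := out = normalize_multiline_text_py_alt value
instance (value : String) (out : String) : Decidable (Spec_normalize_multiline_text_py value out) := by unfold Spec_normalize_multiline_text_py; infer_instance

-- ===== CLAIM (what is proved, stated in full; the proofs are below) =====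
def Claim_equal_normalize_multiline_text_py : Prop := ∀ (value : String), Dom_normalize_multiline_text_py value → Pre_normalize_multiline_text_py value → Spec_normalize_multiline_text_py value (normalize_multiline_text_py value)

-- ===== LEMMAS AND PROOFS =====

-- emitter shape of B's fold: pend is the buffered space/tab run
def pvEmit : List Char → List Char → List Char
  | _, [] => []
  | pend, c :: t =>
    if c == ' ' || c == '\t' then pvEmit (pend ++ [c]) t
    else if c == '\n' then '\n' :: pvEmit [] t
    else pend ++ c :: pvEmit [] t

theorem pv_foldl_eq_emit (s : List Char) (out pend : List Char) :
    (s.foldl pvStep (out, pend)).1 = out ++ pvEmit pend s := by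
  induction s generalizing out pend with
  | nil => simp [pvEmit]
  | cons c t ih =>
    by_cases h1 : (c == ' ' || c == '\t') = true
    · simp [pvStep, pvEmit, h1, ih]
    · by_cases h2 : (c == '\n') = true
      · simp [pvStep, pvEmit, h1, h2, ih]
      · simp [pvStep, pvEmit, h1, h2, ih]

theorem pv_rst_all_st (p : List Char) (h : ∀ c ∈ p, (c == ' ' || c == '\t') = true) :
    pvRstripST p = [] := by
  unfold pvRstripST
  rw [List.dropWhile_eq_nil_iff.2 (by intro c hc; exact h c (List.mem_reverse.1 hc))]
  rfl

theorem pv_rst_append (xs : List Char) (c : Char) (ys : List Char)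
    (h : (c == ' ' || c == '\t') = false) :
    pvRstripST (xs ++ c :: ys) = xs ++ c :: pvRstripST ys := by
  unfold pvRstripST
  rw [show (xs ++ c :: ys).reverse = ys.reverse ++ c :: xs.reverse by simp]
  rw [List.dropWhile_append]
  by_cases he : (ys.reverse.dropWhile (fun c => c == ' ' || c == '\t')).isEmpty = true
  · simp only [he, if_pos]
    rw [List.dropWhile_cons_of_neg (by simp [h])]
    simp [List.isEmpty_iff.1 he]
  · simp only [he, if_neg, Bool.false_eq_true, not_false_iff, if_neg]
    simp

theorem pv_modifyHead_id {α : Type} (l : List α) : List.modifyHead (fun x => x) l = l := by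
  cases l <;> simp

theorem pv_splitOn_modifyHead (q t : List Char) (hq : '\n' ∉ q) :
    (q ++ t).splitOn '\n' = (t.splitOn '\n').modifyHead (q ++ ·) := by
  induction q with
  | nil => simp [pv_modifyHead_id]
  | cons a q' ih =>
    have ha : a ≠ '\n' := fun h => hq (h ▸ List.mem_cons_self)
    have hq' : '\n' ∉ q' := fun h => hq (List.mem_cons_of_mem _ h)
    simp only [List.cons_append, List.splitOn, List.splitOnP_cons] at *
    rw [if_neg (by simp [ha])]
    rw [ih hq']
    obtain ⟨p0, rest, hsp⟩ := List.exists_cons_of_ne_nil (List.splitOnP_ne_nil (· == '\n') t)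
    simp [hsp]

theorem pv_go_eq (fuel : Nat) : ∀ (l cur : List Char) (acc : List (List Char)),
    l.length < fuel →
    PySem.Chars.splitOn.go ['\n'] fuel l cur acc
      = acc.reverse ++ (l.splitOn '\n').modifyHead (cur.reverse ++ ·) := by
  induction fuel with
  | zero => intro l cur acc h; omega
  | succ n ih =>
    intro l cur acc h
    cases l with
    | nil =>
      simp [PySem.Chars.splitOn.go, List.splitOn]
    | cons c rest =>
      rw [PySem.Chars.splitOn.go]
      by_cases hc : c = '\n'
      · subst hc
        rw [if_pos (by simp [List.isPrefixOf])]
        rw [ih _ _ _ (by simpa using Nat.lt_of_succ_lt_succ h)]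
        simp [List.splitOn, List.splitOnP_cons, pv_modifyHead_id]
      · rw [if_neg (by simp [List.isPrefixOf]; exact fun he => hc he.symm)]
        rw [ih _ _ _ (by simpa using Nat.lt_of_succ_lt_succ h)]
        simp only [List.splitOn, List.splitOnP_cons]
        rw [if_neg (by simp [hc])]
        obtain ⟨p0, r, hsp⟩ := List.exists_cons_of_ne_nil (List.splitOnP_ne_nil (· == '\n') rest)
        simp [hsp]

theorem pv_chars_splitOn_eq (s : List Char) :
    PySem.Chars.splitOn s ['\n'] = s.splitOn '\n' := by
  unfold PySem.Chars.splitOn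
  rw [pv_go_eq (s.length + 1) s [] [] (Nat.lt_succ_self _)]
  obtain ⟨p0, r, hsp⟩ := List.exists_cons_of_ne_nil (List.splitOnP_ne_nil (· == '\n') s)
  simp [List.splitOn] at hsp ⊢
  simp [hsp]

theorem pv_emit_eq (s : List Char) : ∀ pend : List Char,
    (∀ c ∈ pend, (c == ' ' || c == '\t') = true) →
    pvEmit pend s = PySem.Chars.join ['\n'] (((pend ++ s).splitOn '\n').map pvRstripST) := by
  induction s with
  | nil =>
    intro pend hp
    rw [pv_splitOn_modifyHead pend [] (by intro hm; simpa using hp _ hm)]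
    simp [List.splitOn, pvEmit, PySem.Chars.join, pv_rst_all_st pend hp, List.intercalate]
  | cons c t ih =>
    intro pend hp
    by_cases h1 : (c == ' ' || c == '\t') = true
    · rw [show pend ++ c :: t = (pend ++ [c]) ++ t by simp]
      rw [pvEmit, if_pos h1]
      exact ih (pend ++ [c]) (by intro x hx; rcases List.mem_append.1 hx with h | h
                                 · exact hp _ h
                                 · simpa [List.mem_singleton.1 h] using h1)
    · by_cases h2 : c = '\n'
      · subst h2
        rw [pvEmit, if_neg (by simp_all), if_pos (by simp)]
        rw [pv_splitOn_modifyHead pend _ (by intro hm; simpa using hp _ hm)]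
        rw [show ('\n' :: t).splitOn '\n' = [] :: t.splitOn '\n' by
          simp [List.splitOn, List.splitOnP_cons]]
        rw [ih [] (by simp)]
        obtain ⟨p0, r, hsp⟩ := List.exists_cons_of_ne_nil (List.splitOnP_ne_nil (· == '\n') t)
        simp only [List.splitOn] at *
        rw [hsp]
        simp [PySem.Chars.join, pv_rst_all_st pend hp, List.intercalate, hsp]
      · rw [pvEmit, if_neg (by simp_all), if_neg (by simp [h2])]
        rw [show pend ++ c :: t = (pend ++ [c]) ++ t by simp]
        rw [pv_splitOn_modifyHead (pend ++ [c]) t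
            (by intro hm; rcases List.mem_append.1 hm with hm | hm
                · simpa using hp _ hm
                · simp at hm; exact h2 hm.symm)]
        rw [ih [] (by simp)]
        obtain ⟨p0, r, hsp⟩ := List.exists_cons_of_ne_nil (List.splitOnP_ne_nil (· == '\n') t)
        simp only [List.splitOn] at *
        rw [hsp]
        have hrst : pvRstripST (pend ++ c :: p0) = pend ++ c :: pvRstripST p0 := by
          simpa using pv_rst_append pend c p0 (by simpa using h1)
        cases r with
        | nil => simp [PySem.Chars.join, hsp, hrst, List.intercalate]
        | cons b r' => simp [PySem.Chars.join, hsp, hrst, List.intercalate]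

theorem pv_strip_append_newline (xs : List Char) :
    PySem.Chars.strip (xs ++ ['\n']) = PySem.Chars.strip xs := by
  unfold PySem.Chars.strip PySem.Chars.lstrip PySem.Chars.rstrip
  rw [List.dropWhile_append]
  by_cases he : (xs.dropWhile PySem.Chars.isspace).isEmpty = true
  · simp only [he, if_pos]
    simp [List.isEmpty_iff.1 he, PySem.Chars.isspace, List.dropWhile]
  · simp only [he, Bool.false_eq_true, not_false_iff, if_neg]
    rw [show ((xs.dropWhile PySem.Chars.isspace) ++ ['\n']).reverse
        = '\n' :: (xs.dropWhile PySem.Chars.isspace).reverse by simp]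
    rw [List.dropWhile_cons_of_pos (by simp [PySem.Chars.isspace])]

theorem pv_join_append_nil (l : List (List Char)) :
    PySem.Chars.join ['\n'] (l ++ [[]])
      = if l = [] then [] else PySem.Chars.join ['\n'] l ++ ['\n'] := by
  induction l with
  | nil => simp [PySem.Chars.join, List.intercalate]
  | cons a t ih =>
    cases t with
    | nil => simp [PySem.Chars.join, List.intercalate]
    | cons b t' =>
      rw [if_neg (by simp)]
      rw [show (a :: b :: t') ++ [[]] = a :: (b :: (t' ++ [[]])) by simp]
      rw [PySem.Chars.join_cons_cons]
      rw [show (b :: (t' ++ [([] : List Char)])) = (b :: t') ++ [[]] by simp, ih, if_neg (by simp)]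
      simp [PySem.Chars.join_cons_cons]

theorem pv_strip_join_popT (ls : List (List Char)) :
    PySem.Chars.strip (PySem.Chars.join ['\n'] (pvPopTrailing ls))
      = PySem.Chars.strip (PySem.Chars.join ['\n'] ls) := by
  induction ls using pvPopTrailing.induct with
  | case1 ls h ih =>
    rw [pvPopTrailing, dif_pos h, ih]
    have hne : ls ≠ [] := by intro he; subst he; simp at h
    have hdecomp : ls = ls.dropLast ++ [[]] := by
      conv_lhs => rw [← List.dropLast_append_getLast hne]
      congr 1
      simp [List.getLast?_eq_getLast hne] at h
      simp [h]
    conv_rhs => rw [hdecomp]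
    rw [pv_join_append_nil]
    by_cases hd : ls.dropLast = []
    · simp [hd, PySem.Chars.join, List.intercalate]
    · rw [if_neg hd, pv_strip_append_newline]
  | case2 ls h => rw [pvPopTrailing, dif_neg h]

-- ===== VERDICT (by name: the statement is the Claim_ definition above) =====
theorem normalize_multiline_text_py_spec : Claim_equal_normalize_multiline_text_py := by
  intro value _ _
  unfold Spec_normalize_multiline_text_py normalize_multiline_text_py normalize_multiline_text_py_alt
  simp only
  rw [pv_chars_splitOn_eq, pv_strip_join_popT, pv_foldl_eq_emit, pv_emit_eq _ [] (by simp)]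
  simp
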